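-- pv_equiv track=rewrite | github.com/KennethN10/python-to-sql-genv2 | generator_v2.py | get_time_period
-- ===== SOURCE A (Python) =====
-- from typing import Iterator, Tuple, List, Optional
--
-- RUSH_HOURS: List[Tuple[int, int]] = [
--     (7, 9),    # Morning rush: 7-9 AM
--     (11, 13),  # Lunch rush: 11AM-1PM
--     (16, 18)   # Evening rush: 4-6 PM
-- ]
--
-- def get_time_period(hour: int) -> str:
--     """Determine which time period a given hour belongs to."""
--     if any(start <= hour < end for start, end in RUSH_HOURS):
--         return 'rush_hour'
--     elif 9 <= hour < 17:  # 9 AM - 5 PM (excluding rush hours)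
--         return 'business'
--     elif 18 <= hour < 22:  # 6 PM - 10 PM
--         return 'evening'
--     else:  # 10 PM - 7 AM
--         return 'overnight'
-- ===== SOURCE B (Python) =====
-- RUSH_HOURS = [(7, 9), (11, 13), (16, 18)]
--
-- def _classify(h):
--     if any(start <= h < end for start, end in RUSH_HOURS):
--         return 'rush_hour'
--     if 9 <= h < 17:
--         return 'business'
--     if 18 <= h < 22:
--         return 'evening'
--     return 'overnight'
--
-- _TABLE = {h: _classify(h) for h in range(24)}
--
-- def get_time_period(hour: int) -> str:
--     """Determine which time period a given hour belongs to."""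
--     return _TABLE.get(hour, 'overnight')
-- ===== Notes on version B (the rewrite author's own statement) =====
-- stated objective: idiomatic
-- what changed: Replaced the runtime branch cascade with a per-hour lookup table precomputed once at import time; the function body is a single dict.get with 'overnight' as the out-of-range default.
import Mathlib
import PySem

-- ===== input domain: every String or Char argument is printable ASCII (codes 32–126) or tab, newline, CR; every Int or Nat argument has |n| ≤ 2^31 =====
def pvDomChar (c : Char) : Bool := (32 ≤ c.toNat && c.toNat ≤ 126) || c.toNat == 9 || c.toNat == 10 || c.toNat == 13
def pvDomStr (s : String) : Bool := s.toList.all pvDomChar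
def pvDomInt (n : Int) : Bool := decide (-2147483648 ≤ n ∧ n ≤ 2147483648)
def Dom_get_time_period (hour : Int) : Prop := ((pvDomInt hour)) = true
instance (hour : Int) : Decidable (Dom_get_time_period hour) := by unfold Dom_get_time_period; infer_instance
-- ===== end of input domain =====

-- B replaces A's branch cascade by a per-hour lookup table built once, with 'overnight' as the out-of-range default (idiomatic).

-- ===== PORT A =====
def RUSH_HOURS : List (Int × Int) := [(7, 9), (11, 13), (16, 18)]

def get_time_period (hour : Int) : String :=
  if RUSH_HOURS.any (fun p => p.1 ≤ hour ∧ hour < p.2) then "rush_hour"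
  else if 9 ≤ hour ∧ hour < 17 then "business"
  else if 18 ≤ hour ∧ hour < 22 then "evening"
  else "overnight"

-- ===== PORT B =====
-- _classify: same rules, applied only at table-build time
def pvClassify (h : Int) : String :=
  if RUSH_HOURS.any (fun p => p.1 ≤ h ∧ h < p.2) then "rush_hour"
  else if 9 ≤ h ∧ h < 17 then "business"
  else if 18 ≤ h ∧ h < 22 then "evening"
  else "overnight"

-- _TABLE = {h: _classify(h) for h in range(24)}
def pvTable : PySem.Dict Int String :=
  (PySem.List.pyRange 0 24 1).foldl (fun d h => d.insert h (pvClassify h)) PySem.Dict.empty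

def get_time_period_alt (hour : Int) : String :=
  pvTable.getD hour "overnight"

-- ===== PRECONDITION & SPEC =====
def Spec_get_time_period (hour : Int) (out : String) : Prop := out = get_time_period_alt hour
instance (hour : Int) (out : String) : Decidable (Spec_get_time_period hour out) := by unfold Spec_get_time_period; infer_instance

-- ===== CLAIM (what is proved, stated in full; the proofs are below) =====
def Claim_equal_get_time_period : Prop := ∀ (hour : Int), Dom_get_time_period hour → Spec_get_time_period hour (get_time_period hour)

-- ===== LEMMAS AND PROOFS =====
-- table lookup for a key outside 0..23 misses every entry and yields the default
theorem pvTable_getD_out (hour : Int) (h : hour < 0 ∨ 24 ≤ hour) :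
    pvTable.getD hour "overnight" = "overnight" := by
  have : pvTable = PySem.Dict.mk
      [(0, pvClassify 0), (1, pvClassify 1), (2, pvClassify 2), (3, pvClassify 3),
       (4, pvClassify 4), (5, pvClassify 5), (6, pvClassify 6), (7, pvClassify 7),
       (8, pvClassify 8), (9, pvClassify 9), (10, pvClassify 10), (11, pvClassify 11),
       (12, pvClassify 12), (13, pvClassify 13), (14, pvClassify 14), (15, pvClassify 15),
       (16, pvClassify 16), (17, pvClassify 17), (18, pvClassify 18), (19, pvClassify 19),
       (20, pvClassify 20), (21, pvClassify 21), (22, pvClassify 22), (23, pvClassify 23)] := by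
    rfl
  rw [this]
  simp only [PySem.Dict.getD, PySem.Dict.get?]
  rw [List.find?_eq_none.mpr]
  · rfl
  · intro p hp
    fin_cases hp <;> simp only [beq_iff_eq] <;> omega

theorem a_out_overnight (hour : Int) (h : hour < 0 ∨ 24 ≤ hour) :
    get_time_period hour = "overnight" := by
  unfold get_time_period RUSH_HOURS
  simp only [List.any_cons, List.any_nil]
  split_ifs with h1 h2 h3 <;> first | rfl | (exfalso; simp_all; omega)

-- ===== VERDICT (by name: the statement is the Claim_ definition above) =====
theorem get_time_period_spec : Claim_equal_get_time_period := by
  intro hour _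
  unfold Spec_get_time_period
  by_cases hin : 0 ≤ hour ∧ hour < 24
  · obtain ⟨h0, h24⟩ := hin
    interval_cases hour <;> decide
  · have h' : hour < 0 ∨ 24 ≤ hour := by omega
    rw [a_out_overnight hour h', get_time_period_alt, pvTable_getD_out hour h']
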